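-- pv_equiv track=rewrite | github.com/jmarias-edu/python-portfolio | 04 AI Exercises using Python/Exer1 (UI Review)/defunctExer1.py | getMovable
-- ===== SOURCE A (Python) =====
-- def getMovable(p):
--     movable = []
--     for i in range(3):
--         for j in range(3):
--             if p[i][j] == 0:
--                 if i == 0 and j == 0:
--                     movable.extend((1,3))
--                 elif i == 0 and j == 1:
--                     movable.extend((0,2,4))
--                 elif i == 0 and j == 2:
--                     movable.extend((1,5))
--                 elif i == 1 and j == 0:
--                     movable.extend((0,4,6))
--                 elif i == 1 and j == 1:
--                     movable.extend((1,3,5,7))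
--                 elif i == 1 and j == 2:
--                     movable.extend((2,4,8))
--                 elif i == 2 and j == 0:
--                     movable.extend((3,7))
--                 elif i == 2 and j == 1:
--                     movable.extend((4,6,8))
--                 elif i == 2 and j == 2:
--                     movable.extend((5,7))
--
--                 return movable, i, j
-- ===== SOURCE B (Python) =====
-- def getMovable(p):
--     for i, row in enumerate(p[:3]):
--         pre = row[:3]
--         if 0 in pre:
--             j = pre.index(0)
--             movable = [3 * ni + nj
--                        for ni, nj in ((i - 1, j), (i, j - 1), (i, j + 1), (i + 1, j))
--                        if 0 <= ni < 3 and 0 <= nj < 3]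
--             return movable, i, j
-- ===== Notes on version B (the rewrite author's own statement) =====
-- stated objective: simpler
-- what changed: Replaces A's cell-by-cell 3x3 scan with nine hardcoded neighbor tables by a per-row search for the blank (0 in row[:3] / index) plus a bounds-checked delta sweep up,left,right,down that computes the movable flat indices.
-- outside the precondition, e.g. on getMovable([[1, 2, 3], [4, 5, 6], [7, 8, 9]]): A returns None, B returns None; on getMovable([[1]]): A raises IndexError, B returns None
import Mathlib
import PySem

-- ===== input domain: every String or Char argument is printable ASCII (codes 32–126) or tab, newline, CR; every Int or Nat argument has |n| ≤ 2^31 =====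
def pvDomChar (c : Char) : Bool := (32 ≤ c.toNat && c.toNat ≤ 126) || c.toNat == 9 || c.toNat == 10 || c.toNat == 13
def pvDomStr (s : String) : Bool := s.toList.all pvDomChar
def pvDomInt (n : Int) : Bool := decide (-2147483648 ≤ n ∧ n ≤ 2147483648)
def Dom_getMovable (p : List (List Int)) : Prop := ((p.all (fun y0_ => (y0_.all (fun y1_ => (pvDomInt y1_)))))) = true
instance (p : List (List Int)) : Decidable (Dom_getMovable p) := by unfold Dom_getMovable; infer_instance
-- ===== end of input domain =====

-- B replaces A's nine hardcoded neighbor tables and cell-by-cell scan with a per-row search for the blank plus a bounds-checked delta sweep; simpler decomposition, same cost.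


-- ===== PORT A =====
-- A's if/elif table of movable indices for the blank at (i, j)
def aTable (i j : Int) : List Int :=
  if i = 0 ∧ j = 0 then [1, 3]
  else if i = 0 ∧ j = 1 then [0, 2, 4]
  else if i = 0 ∧ j = 2 then [1, 5]
  else if i = 1 ∧ j = 0 then [0, 4, 6]
  else if i = 1 ∧ j = 1 then [1, 3, 5, 7]
  else if i = 1 ∧ j = 2 then [2, 4, 8]
  else if i = 2 ∧ j = 0 then [3, 7]
  else if i = 2 ∧ j = 1 then [4, 6, 8]
  else if i = 2 ∧ j = 2 then [5, 7]
  else []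

-- p[i][j] (none = IndexError; Pre_ excludes inputs on which A hits it)
def aCell (p : List (List Int)) (i j : Int) : Option Int :=
  (PySem.List.pyGet? p i).bind (fun row => PySem.List.pyGet? row j)

-- inner 'for j in range(3)' with early return
def aLoopJ (p : List (List Int)) (i : Int) : List Int → Option (List Int × Int × Int)
  | [] => none
  | j :: js => if aCell p i j = some 0 then some (aTable i j, i, j) else aLoopJ p i js

-- outer 'for i in range(3)' with early return
def aLoopI (p : List (List Int)) : List (Int) → Option (List Int × Int × Int)
  | [] => none
  | i :: is =>
    match aLoopJ p i (PySem.List.pyRange 0 3 1) with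
    | some r => some r
    | none => aLoopI p is

-- Python falls through and returns None when the scan finds no 0 (outside Pre_); ([], 0, 0) stands in for it
def getMovable (p : List (List Int)) : List Int × Int × Int :=
  (aLoopI p (PySem.List.pyRange 0 3 1)).getD ([], 0, 0)

-- ===== PORT B =====
-- the movable list for the blank at (i, j): deltas up, left, right, down, kept when in bounds
def bMov (i j : Int) : List Int :=
  ([(i - 1, j), (i, j - 1), (i, j + 1), (i + 1, j)] : List (Int × Int)).foldl
    (fun acc nn =>
      if 0 ≤ nn.1 ∧ nn.1 < 3 ∧ 0 ≤ nn.2 ∧ nn.2 < 3 then acc ++ [3 * nn.1 + nn.2] else acc) []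

-- 'for i, row in enumerate(p[:3])' with early return
def bLoop : Int → List (List Int) → List Int × Int × Int
  | _, [] => ([], 0, 0)   -- Python B falls through and returns None here (outside Pre_)
  | i, row :: rest =>
    let pre := PySem.List.slice row none (some 3)
    if (0 : Int) ∈ pre then
      match PySem.List.index? pre 0 with
      | some j => (bMov i (j : Int), i, (j : Int))
      | none => ([], 0, 0)  -- unreachable: 0 ∈ pre
    else bLoop (i + 1) rest

def getMovable_alt (p : List (List Int)) : List Int × Int × Int :=
  bLoop 0 (PySem.List.slice p none (some 3))

-- ===== PRECONDITION & SPEC =====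
-- Pre_ is exactly the inputs on which A returns a tuple: a 0 reached by A's 3x3 scan before any
-- IndexError.  Excluded: inputs where A raises IndexError (a row shorter than 3 is exhausted before
-- any 0 is found), and inputs where the scan finds no 0, on which A returns None — not a value of
-- the declared return type.
def Pre_getMovable (p : List (List Int)) : Prop :=
  ∃ i < 3, i < p.length ∧ (∀ i' < i, 3 ≤ (p.getD i' []).length) ∧
    ∃ j < 3, j < (p.getD i []).length ∧ (p.getD i []).getD j 1 = 0
instance (p : List (List Int)) : Decidable (Pre_getMovable p) := by unfold Pre_getMovable; infer_instance

def pvWitness_getMovable : List (List Int) := [[1, 2, 3], [4, 0, 5], [6, 7, 8]]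

def Spec_getMovable (p : List (List Int)) (out : List Int × Int × Int) : Prop := out = getMovable_alt p
instance (p : List (List Int)) (out : List Int × Int × Int) : Decidable (Spec_getMovable p out) := by unfold Spec_getMovable; infer_instance

-- ===== CLAIM (what is proved, stated in full; the proofs are below) =====
def Claim_equal_getMovable : Prop := ∀ (p : List (List Int)), Dom_getMovable p → Pre_getMovable p → Spec_getMovable p (getMovable p)

-- ===== LEMMAS AND PROOFS =====

-- p[:3] / row[:3] is take 3
theorem slice3 {α : Type} (xs : List α) : PySem.List.slice xs none (some 3) = xs.take 3 := by
  have h := PySem.List.slice_to_natCast xs 3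
  simpa using h

-- a row that p[i] misses contributes nothing
theorem rowMiss (p : List (List Int)) (i : Int) (hi : PySem.List.pyGet? p i = none) :
    aLoopJ p i (PySem.List.pyRange 0 3 1) = none := by
  have hr : PySem.List.pyRange 0 3 1 = [0, 1, 2] := by decide
  simp [aLoopJ, aCell, hi, hr]

-- the inner loop over row i returns exactly at the first 0 among the row's first three entries
theorem rowEq (p : List (List Int)) (i : Int) (row : List Int)
    (hi : PySem.List.pyGet? p i = some row) :
    aLoopJ p i (PySem.List.pyRange 0 3 1)
      = (PySem.List.index? (row.take 3) 0).map (fun j => (aTable i (j : Int), i, (j : Int))) := by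
  have hr : PySem.List.pyRange 0 3 1 = [0, 1, 2] := by decide
  have hc : ∀ j, aCell p i j = PySem.List.pyGet? row j := fun j => by simp [aCell, hi]
  rcases row with _ | ⟨x, _ | ⟨y, _ | ⟨z, t⟩⟩⟩
  · simp [aLoopJ, hc, hr, PySem.List.pyGet?_of_nonneg,
        PySem.List.index?_eq_idxOf?, List.idxOf?, List.findIdx?_cons]
  · by_cases hx : x = 0
    · subst hx; simp [aLoopJ, hc, hr, PySem.List.pyGet?_of_nonneg,
        PySem.List.index?_eq_idxOf?, List.idxOf?, List.findIdx?_cons]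
    · simp [aLoopJ, hc, hr, PySem.List.pyGet?_of_nonneg,
        PySem.List.index?_eq_idxOf?, List.idxOf?, List.findIdx?_cons, hx]
  · by_cases hx : x = 0
    · subst hx; simp [aLoopJ, hc, hr, PySem.List.pyGet?_of_nonneg,
        PySem.List.index?_eq_idxOf?, List.idxOf?, List.findIdx?_cons]
    · by_cases hy : y = 0
      · subst hy; simp [aLoopJ, hc, hr, PySem.List.pyGet?_of_nonneg,
        PySem.List.index?_eq_idxOf?, List.idxOf?, List.findIdx?_cons, hx]
      · simp [aLoopJ, hc, hr, PySem.List.pyGet?_of_nonneg,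
        PySem.List.index?_eq_idxOf?, List.idxOf?, List.findIdx?_cons, hx, hy]
  · by_cases hx : x = 0
    · subst hx; simp [aLoopJ, hc, hr, PySem.List.pyGet?_of_nonneg,
        PySem.List.index?_eq_idxOf?, List.idxOf?, List.findIdx?_cons]
    · by_cases hy : y = 0
      · subst hy; simp [aLoopJ, hc, hr, PySem.List.pyGet?_of_nonneg,
        PySem.List.index?_eq_idxOf?, List.idxOf?, List.findIdx?_cons, hx]
      · by_cases hz : z = 0
        · subst hz; simp [aLoopJ, hc, hr, PySem.List.pyGet?_of_nonneg,
        PySem.List.index?_eq_idxOf?, List.idxOf?, List.findIdx?_cons, hx, hy]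
        · simp [aLoopJ, hc, hr, PySem.List.pyGet?_of_nonneg,
        PySem.List.index?_eq_idxOf?, List.idxOf?, List.findIdx?_cons, hx, hy, hz]

-- A's table is B's delta sweep, for every blank position
theorem tableEq (i : Int) (hi0 : 0 ≤ i) (hi3 : i < 3) (j : Nat) (hj : j < 3) :
    aTable i (j : Int) = bMov i (j : Int) := by
  interval_cases i <;> interval_cases j <;> decide

theorem jlt3 (row : List Int) (j : Nat) (hj : PySem.List.index? (row.take 3) 0 = some j) : j < 3 := by
  rw [PySem.List.index?_eq_some_iff] at hj
  obtain ⟨pre, suf, hsplit, hlen, -⟩ := hj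
  have := congrArg List.length hsplit
  have h3 : (row.take 3).length ≤ 3 := by simp
  simp at this
  omega

-- the two ports agree on every input (Pre_ is not needed for the ports themselves)
theorem mem_of_index?_some {xs : List Int} {j : Nat}
    (h : PySem.List.index? xs 0 = some j) : (0 : Int) ∈ xs := by
  rw [PySem.List.index?_eq_some_iff] at h
  obtain ⟨pre, suf, hs, -, -⟩ := h
  subst hs; simp

theorem ports_eq (p : List (List Int)) : getMovable p = getMovable_alt p := by
  have hr : PySem.List.pyRange 0 3 1 = [0, 1, 2] := by decide
  rcases p with _ | ⟨r0, _ | ⟨r1, _ | ⟨r2, rest⟩⟩⟩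
  · -- p = []
    have em : ∀ i : Int, aLoopJ ([] : List (List Int)) i [0, 1, 2] = none := by
      intro i
      have := rowMiss [] i (by simp [PySem.List.pyGet?, PySem.List.pyIdx?])
      rwa [hr] at this
    simp [getMovable, getMovable_alt, hr, slice3, aLoopI, bLoop, em]
  · -- p = [r0]
    have g0 : PySem.List.pyGet? [r0] (0 : Int) = some r0 := by simp [PySem.List.pyGet?_of_nonneg]
    have e0 := rowEq [r0] 0 r0 g0
    rw [hr] at e0
    have e1 : aLoopJ [r0] (1 : Int) [0, 1, 2] = none := by
      have := rowMiss [r0] 1 (by simp [PySem.List.pyGet?_of_nonneg])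
      rwa [hr] at this
    have e2 : aLoopJ [r0] (2 : Int) [0, 1, 2] = none := by
      have := rowMiss [r0] 2 (by simp [PySem.List.pyGet?_of_nonneg])
      rwa [hr] at this
    rcases h0 : PySem.List.index? (r0.take 3) 0 with _ | j0
    case some =>
      have m0 : (0 : Int) ∈ r0.take 3 := mem_of_index?_some h0
      have hj0 := jlt3 r0 j0 h0
      have h0' : List.idxOf? 0 (r0.take 3) = some j0 := by simpa using h0
      simp [getMovable, getMovable_alt, hr, slice3, aLoopI, bLoop, e0, e1, e2, h0', m0, tableEq 0 (by norm_num) (by norm_num) j0 hj0]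
    case none =>
    have n0 : (0 : Int) ∉ r0.take 3 := (PySem.List.index?_eq_none_iff _ _).mp h0
    have h0' : List.idxOf? 0 (r0.take 3) = none := by simpa using h0
    simp [getMovable, getMovable_alt, hr, slice3, aLoopI, bLoop, e0, e1, e2, h0', n0]
  · -- p = [r0, r1]
    have g0 : PySem.List.pyGet? [r0, r1] (0 : Int) = some r0 := by simp [PySem.List.pyGet?_of_nonneg]
    have e0 := rowEq [r0, r1] 0 r0 g0
    rw [hr] at e0
    have g1 : PySem.List.pyGet? [r0, r1] (1 : Int) = some r1 := by simp [PySem.List.pyGet?_of_nonneg]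
    have e1 := rowEq [r0, r1] 1 r1 g1
    rw [hr] at e1
    have e2 : aLoopJ [r0, r1] (2 : Int) [0, 1, 2] = none := by
      have := rowMiss [r0, r1] 2 (by simp [PySem.List.pyGet?_of_nonneg])
      rwa [hr] at this
    rcases h0 : PySem.List.index? (r0.take 3) 0 with _ | j0
    case some =>
      have m0 : (0 : Int) ∈ r0.take 3 := mem_of_index?_some h0
      have hj0 := jlt3 r0 j0 h0
      have h0' : List.idxOf? 0 (r0.take 3) = some j0 := by simpa using h0
      simp [getMovable, getMovable_alt, hr, slice3, aLoopI, bLoop, e0, e1, e2, h0', m0, tableEq 0 (by norm_num) (by norm_num) j0 hj0]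
    case none =>
    have n0 : (0 : Int) ∉ r0.take 3 := (PySem.List.index?_eq_none_iff _ _).mp h0
    have h0' : List.idxOf? 0 (r0.take 3) = none := by simpa using h0
    rcases h1 : PySem.List.index? (r1.take 3) 0 with _ | j1
    case some =>
      have m1 : (0 : Int) ∈ r1.take 3 := mem_of_index?_some h1
      have hj1 := jlt3 r1 j1 h1
      have h1' : List.idxOf? 0 (r1.take 3) = some j1 := by simpa using h1
      simp [getMovable, getMovable_alt, hr, slice3, aLoopI, bLoop, e0, e1, e2, h0', n0, h1', m1, tableEq 1 (by norm_num) (by norm_num) j1 hj1]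
    case none =>
    have n1 : (0 : Int) ∉ r1.take 3 := (PySem.List.index?_eq_none_iff _ _).mp h1
    have h1' : List.idxOf? 0 (r1.take 3) = none := by simpa using h1
    simp [getMovable, getMovable_alt, hr, slice3, aLoopI, bLoop, e0, e1, e2, h0', n0, h1', n1]
  · -- p = (r0 :: r1 :: r2 :: rest)
    have g0 : PySem.List.pyGet? (r0 :: r1 :: r2 :: rest) (0 : Int) = some r0 := by simp [PySem.List.pyGet?_of_nonneg]
    have e0 := rowEq (r0 :: r1 :: r2 :: rest) 0 r0 g0
    rw [hr] at e0
    have g1 : PySem.List.pyGet? (r0 :: r1 :: r2 :: rest) (1 : Int) = some r1 := by simp [PySem.List.pyGet?_of_nonneg]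
    have e1 := rowEq (r0 :: r1 :: r2 :: rest) 1 r1 g1
    rw [hr] at e1
    have g2 : PySem.List.pyGet? (r0 :: r1 :: r2 :: rest) (2 : Int) = some r2 := by simp [PySem.List.pyGet?_of_nonneg]
    have e2 := rowEq (r0 :: r1 :: r2 :: rest) 2 r2 g2
    rw [hr] at e2
    rcases h0 : PySem.List.index? (r0.take 3) 0 with _ | j0
    case some =>
      have m0 : (0 : Int) ∈ r0.take 3 := mem_of_index?_some h0
      have hj0 := jlt3 r0 j0 h0
      have h0' : List.idxOf? 0 (r0.take 3) = some j0 := by simpa using h0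
      simp [getMovable, getMovable_alt, hr, slice3, aLoopI, bLoop, e0, e1, e2, h0', m0, tableEq 0 (by norm_num) (by norm_num) j0 hj0]
    case none =>
    have n0 : (0 : Int) ∉ r0.take 3 := (PySem.List.index?_eq_none_iff _ _).mp h0
    have h0' : List.idxOf? 0 (r0.take 3) = none := by simpa using h0
    rcases h1 : PySem.List.index? (r1.take 3) 0 with _ | j1
    case some =>
      have m1 : (0 : Int) ∈ r1.take 3 := mem_of_index?_some h1
      have hj1 := jlt3 r1 j1 h1
      have h1' : List.idxOf? 0 (r1.take 3) = some j1 := by simpa using h1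
      simp [getMovable, getMovable_alt, hr, slice3, aLoopI, bLoop, e0, e1, e2, h0', n0, h1', m1, tableEq 1 (by norm_num) (by norm_num) j1 hj1]
    case none =>
    have n1 : (0 : Int) ∉ r1.take 3 := (PySem.List.index?_eq_none_iff _ _).mp h1
    have h1' : List.idxOf? 0 (r1.take 3) = none := by simpa using h1
    rcases h2 : PySem.List.index? (r2.take 3) 0 with _ | j2
    case some =>
      have m2 : (0 : Int) ∈ r2.take 3 := mem_of_index?_some h2
      have hj2 := jlt3 r2 j2 h2
      have h2' : List.idxOf? 0 (r2.take 3) = some j2 := by simpa using h2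
      simp [getMovable, getMovable_alt, hr, slice3, aLoopI, bLoop, e0, e1, e2, h0', n0, h1', n1, h2', m2, tableEq 2 (by norm_num) (by norm_num) j2 hj2]
    case none =>
    have n2 : (0 : Int) ∉ r2.take 3 := (PySem.List.index?_eq_none_iff _ _).mp h2
    have h2' : List.idxOf? 0 (r2.take 3) = none := by simpa using h2
    simp [getMovable, getMovable_alt, hr, slice3, aLoopI, bLoop, e0, e1, e2, h0', n0, h1', n1, h2', n2]

-- ===== VERDICT (by name: the statement is the Claim_ definition above) =====
theorem getMovable_spec : Claim_equal_getMovable := by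
  intro p _ _
  exact ports_eq p
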